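-- pv_equiv track=rewrite | github.com/glkclass/rtl_example | usb/host_app/usb_bridge_flash.py | get_packet_addr
-- ===== SOURCE A (Python) =====
-- FLASH_SIZE = pow(2, 26)  # 2^26 MBytes = 64 MBytes = 512 Mbits
--
-- FLASH_PAGE_SIZE = pow(2, 8)
--
-- def get_packet_addr(addr):
--     assert addr >= 0 and addr <= (FLASH_SIZE - FLASH_PAGE_SIZE), f'log.debug 0x{addr:X}'
--     packet = []
--     for i in range(4):
--         packet.append(addr & 0xFF)
--         addr >>= 8
--     packet.reverse()
--     return packet
-- ===== SOURCE B (Python) =====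
-- FLASH_SIZE = pow(2, 26)  # 2^26 MBytes = 64 MBytes = 512 Mbits
--
-- FLASH_PAGE_SIZE = pow(2, 8)
--
-- def get_packet_addr(addr):
--     assert addr >= 0 and addr <= (FLASH_SIZE - FLASH_PAGE_SIZE), f'log.debug 0x{addr:X}'
--     return list(addr.to_bytes(4, 'big'))
-- ===== Notes on version B (the rewrite author's own statement) =====
-- stated objective: idiomatic
-- what changed: Replaces the mask-shift loop plus list reverse with a single closed-form int.to_bytes(4, 'big') conversion.
import Mathlib
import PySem

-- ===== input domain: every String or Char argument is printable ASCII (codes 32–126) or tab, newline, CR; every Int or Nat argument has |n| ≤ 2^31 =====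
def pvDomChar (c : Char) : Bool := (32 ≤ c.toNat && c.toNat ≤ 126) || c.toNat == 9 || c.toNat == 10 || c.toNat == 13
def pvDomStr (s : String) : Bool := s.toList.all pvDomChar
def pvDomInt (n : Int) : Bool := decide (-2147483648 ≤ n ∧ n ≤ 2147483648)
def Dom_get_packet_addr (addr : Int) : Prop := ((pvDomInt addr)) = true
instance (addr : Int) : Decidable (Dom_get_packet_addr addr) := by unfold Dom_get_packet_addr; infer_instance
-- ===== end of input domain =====

-- B replaces A's mask-and-shift loop (+ reverse) with the closed-form big-endian byte
-- extraction of int.to_bytes(4, 'big'); same list for every addr passing the assert.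

-- ===== PORT A =====
-- loop: packet.append(addr & 0xFF); addr >>= 8   (for nonneg and neg ints alike,
-- Python's '& 0xFF' is floor-mod 256 and '>> 8' is floor-division by 256)
def get_packet_addr (addr : Int) : List Int :=
  let s := (List.range 4).foldl
    (fun (s : List Int × Int) _ => (s.1 ++ [PySem.Int.mod s.2 256], PySem.Int.floordiv s.2 256))
    ([], addr)
  s.1.reverse

-- ===== PORT B =====
-- list(addr.to_bytes(4, 'big')): the four big-endian bytes, closed form
def get_packet_addr_alt (addr : Int) : List Int :=
  [ PySem.Int.mod (PySem.Int.floordiv addr 16777216) 256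
  , PySem.Int.mod (PySem.Int.floordiv addr 65536) 256
  , PySem.Int.mod (PySem.Int.floordiv addr 256) 256
  , PySem.Int.mod addr 256 ]

-- ===== PRECONDITION & SPEC =====
-- the assert bound (addr between zero and FLASH_SIZE - FLASH_PAGE_SIZE); A raises AssertionError outside it
def Pre_get_packet_addr (addr : Int) : Prop := 0 ≤ addr ∧ addr ≤ 67108864 - 256
instance (addr : Int) : Decidable (Pre_get_packet_addr addr) := by unfold Pre_get_packet_addr; infer_instance
def pvWitness_get_packet_addr : Int := (12345678)

def Spec_get_packet_addr (addr : Int) (out : List Int) : Prop := out = get_packet_addr_alt addr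
instance (addr : Int) (out : List Int) : Decidable (Spec_get_packet_addr addr out) := by unfold Spec_get_packet_addr; infer_instance

-- ===== CLAIM (what is proved, stated in full; the proofs are below) =====
def Claim_equal_get_packet_addr : Prop := ∀ (addr : Int), Dom_get_packet_addr addr → Pre_get_packet_addr addr → Spec_get_packet_addr addr (get_packet_addr addr)

-- ===== LEMMAS AND PROOFS =====

lemma fdiv_fdiv (a : Int) (b c : Int) (hb : 0 < b) (hc : 0 < c) :
    PySem.Int.floordiv (PySem.Int.floordiv a b) c = PySem.Int.floordiv a (b * c) := by
  rw [PySem.Int.floordiv_eq_ediv_of_pos hb, PySem.Int.floordiv_eq_ediv_of_pos hc,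
      PySem.Int.floordiv_eq_ediv_of_pos (by positivity)]
  exact Int.ediv_ediv_of_nonneg (le_of_lt hb)

-- ===== VERDICT (by name: the statement is the Claim_ definition above) =====
theorem get_packet_addr_spec : Claim_equal_get_packet_addr := by
  intro addr _ _
  show _ = _
  simp only [get_packet_addr, get_packet_addr_alt, List.range, List.range.loop, List.foldl,
    List.nil_append, List.cons_append, List.reverse_cons, List.reverse_nil]
  rw [fdiv_fdiv addr 256 256 (by norm_num) (by norm_num)]
  norm_num
  omega
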